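-- pv_equiv track=rewrite | github.com/devtinkubot/tinkubot-microservices | python-services/ai-clientes/services/service_detector.py | _determine_primary_service
-- ===== SOURCE A (Python) =====
-- from typing import List, Optional, Set, TYPE_CHECKING
--
-- def _determine_primary_service(
--
--     services: List[str],
--     normalized_message: str
-- ) -> Optional[str]:
--     """
--     Determinar el servicio primario de la lista.
--
--     Prioridades:
--     1. Servicio que aparece primero en el mensaje
--     2. Servicio más específico (más largo)
--     3. Primer servicio de la lista
--
--     Args:
--         services: Lista de servicios detectados
--         normalized_message: Mensaje normalizado
--
--     Returns:
--         Servicio primario o None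
--     """
--     if not services:
--         return None
--
--     # Buscar posición de cada servicio en el mensaje
--     service_positions = []
--     for service in services:
--         pos = normalized_message.find(service)
--         if pos != -1:
--             service_positions.append((service, pos))
--
--     if not service_positions:
--         return services[0]
--
--     # Ordenar por posición (aparece primero = más importante)
--     service_positions.sort(key=lambda x: x[1])
--
--     # Si hay empate en posición, elegir el más largo (más específico)
--     primary = service_positions[0][0]
--     for service, pos in service_positions:
--         if pos == service_positions[0][1] and len(service) > len(primary):
--             primary = service
--
--     return primary
-- ===== SOURCE B (Python) =====
-- from typing import List, Optional
--
-- def _determine_primary_service(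
--     services: List[str],
--     normalized_message: str
-- ) -> Optional[str]:
--     if not services:
--         return None
--     best = None  # (service, pos)
--     for service in services:
--         pos = normalized_message.find(service)
--         if pos == -1:
--             continue
--         if best is None or pos < best[1] or (pos == best[1] and len(service) > len(best[0])):
--             best = (service, pos)
--     if best is None:
--         return services[0]
--     return best[0]
-- ===== Notes on version B (the rewrite author's own statement) =====
-- stated objective: simpler
-- what changed: Replaced the build-list + stable sort + tie-break rescan with a single linear pass that keeps one running best (service, position), updating on strictly smaller position or equal position with strictly greater length.
import Mathlib
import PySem

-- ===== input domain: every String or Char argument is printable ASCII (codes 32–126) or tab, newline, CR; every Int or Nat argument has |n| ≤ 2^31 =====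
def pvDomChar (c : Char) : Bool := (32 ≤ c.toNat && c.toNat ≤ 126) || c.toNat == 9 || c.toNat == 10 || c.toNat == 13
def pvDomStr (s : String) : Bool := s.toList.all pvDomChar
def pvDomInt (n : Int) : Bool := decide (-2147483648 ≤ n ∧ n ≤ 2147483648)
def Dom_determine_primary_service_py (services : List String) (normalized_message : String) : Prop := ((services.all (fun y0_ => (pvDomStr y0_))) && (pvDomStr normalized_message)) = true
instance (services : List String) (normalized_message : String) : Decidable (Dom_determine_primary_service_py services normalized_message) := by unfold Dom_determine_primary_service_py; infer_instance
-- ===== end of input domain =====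

-- B replaces A's build-list + stable sort + tie-break rescan with a single linear pass
-- keeping one running best (service, position); the return values are proved equal.

-- ===== PORT A =====
def determine_primary_service_py (services : List String) (normalized_message : String) : Option String :=
  match services with
  | [] => none
  | s0 :: _ =>
    -- service_positions: append (service, pos) for each service found in the message
    let ps := services.foldl (fun acc s =>
      if PySem.Str.find normalized_message s ≠ -1 then
        acc ++ [(s, PySem.Str.find normalized_message s)]
      else acc) []
    if ps.isEmpty then some s0
    else
      -- service_positions.sort(key=lambda x: x[1])
      let q := PySem.List.sorted ps (fun x => x.2)
      let first := q.headD ("", 0)   -- q[0]; q is nonempty here, the default is never used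
      let primary := q.foldl (fun primary sp =>
        if sp.2 = first.2 ∧ PySem.Str.len sp.1 > PySem.Str.len primary then sp.1 else primary) first.1
      some primary

-- ===== PORT B =====
def determine_primary_service_py_alt (services : List String) (normalized_message : String) : Option String :=
  match services with
  | [] => none
  | s0 :: _ =>
    let best := services.foldl (fun best s =>
      if PySem.Str.find normalized_message s = -1 then best
      else
        match best with
        | none => some (s, PySem.Str.find normalized_message s)
        | some (bs, bp) =>
          if PySem.Str.find normalized_message s < bp ∨
              (PySem.Str.find normalized_message s = bp ∧ PySem.Str.len s > PySem.Str.len bs) then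
            some (s, PySem.Str.find normalized_message s)
          else best)
      (none : Option (String × Int))
    match best with
    | none => some s0
    | some (bs, _) => some bs

-- ===== PRECONDITION & SPEC =====
def Spec_determine_primary_service_py (services : List String) (normalized_message : String) (out : Option String) : Prop := out = determine_primary_service_py_alt services normalized_message
instance (services : List String) (normalized_message : String) (out : Option String) : Decidable (Spec_determine_primary_service_py services normalized_message out) := by unfold Spec_determine_primary_service_py; infer_instance

-- ===== CLAIM (what is proved, stated in full; the proofs are below) =====
def Claim_equal_determine_primary_service_py : Prop := ∀ (services : List String) (normalized_message : String), Dom_determine_primary_service_py services normalized_message → Spec_determine_primary_service_py services normalized_message (determine_primary_service_py services normalized_message)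

-- ===== LEMMAS AND PROOFS =====

-- A's filtered (service, position) list, in recursive form
def pvPsList (msg : String) : List String → List (String × Int)
  | [] => []
  | s :: t =>
    if PySem.Str.find msg s ≠ -1 then (s, PySem.Str.find msg s) :: pvPsList msg t
    else pvPsList msg t

-- A's tie-break fold: first candidate of maximal length
def pvMaxLen (b : String) : List (String × Int) → String
  | [] => b
  | sp :: l => pvMaxLen (if PySem.Str.len sp.1 > PySem.Str.len b then sp.1 else b) l

-- B's running-best step on pairs
def pvStepB (b y : String × Int) : String × Int :=
  if y.2 < b.2 ∨ (y.2 = b.2 ∧ PySem.Str.len y.1 > PySem.Str.len b.1) then y else b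

def pvG (best : Option (String × Int)) (y : String × Int) : Option (String × Int) :=
  match best with
  | none => some y
  | some b => some (pvStepB b y)

def pvBestOf : List (String × Int) → Option (String × Int)
  | [] => none
  | f :: t => some (t.foldl pvStepB f)

theorem pvPs_eq (msg : String) : ∀ (l : List String) (acc : List (String × Int)),
    l.foldl (fun acc s =>
      if PySem.Str.find msg s ≠ -1 then
        acc ++ [(s, PySem.Str.find msg s)]
      else acc) acc = acc ++ pvPsList msg l := by
  intro l
  induction l with
  | nil => intro acc; simp only [List.foldl_nil, pvPsList, List.append_nil]
  | cons s t ih =>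
    intro acc
    simp only [List.foldl_cons, pvPsList]
    by_cases h : PySem.Str.find msg s ≠ -1
    · rw [if_pos h, if_pos h, ih, List.append_assoc, List.singleton_append]
    · rw [if_neg h, if_neg h]; exact ih acc

theorem pvB_fold_eq (msg : String) : ∀ (l : List String) (b : Option (String × Int)),
    l.foldl (fun best s =>
      if PySem.Str.find msg s = -1 then best
      else
        match best with
        | none => some (s, PySem.Str.find msg s)
        | some (bs, bp) =>
          if PySem.Str.find msg s < bp ∨
              (PySem.Str.find msg s = bp ∧ PySem.Str.len s > PySem.Str.len bs) then
            some (s, PySem.Str.find msg s)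
          else best) b
    = (pvPsList msg l).foldl pvG b := by
  intro l
  induction l with
  | nil => intro b; simp only [List.foldl_nil, pvPsList]
  | cons s t ih =>
    intro b
    simp only [List.foldl_cons, pvPsList]
    by_cases h : PySem.Str.find msg s = -1
    · rw [if_pos h, if_neg (not_not_intro h)]; exact ih b
    · rw [if_neg h, if_pos h, List.foldl_cons]
      cases b with
      | none => exact ih (some (s, PySem.Str.find msg s))
      | some p =>
        obtain ⟨bs, bp⟩ := p
        simp only [pvG, pvStepB]
        split_ifs with hc
        · exact ih (some (s, PySem.Str.find msg s))
        · exact ih (some (bs, bp))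

theorem pvB_fold_some : ∀ (l : List (String × Int)) (b : String × Int),
    l.foldl pvG (some b) = some (l.foldl pvStepB b) := by
  intro l
  induction l with
  | nil => intro b; simp only [List.foldl_nil]
  | cons y t ih => intro b; simp only [List.foldl_cons, pvG]; exact ih (pvStepB b y)

theorem pvBestOf_eq : ∀ (l : List (String × Int)), l.foldl pvG none = pvBestOf l := by
  intro l
  cases l with
  | nil => rfl
  | cons f t => rw [List.foldl_cons]; exact pvB_fold_some t f

-- A's tie-break loop only looks at entries at position c: it is pvMaxLen over the filter
theorem pvA_fold_eq (c : Int) : ∀ (l : List (String × Int)) (b : String),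
    l.foldl (fun primary sp =>
      if sp.2 = c ∧ PySem.Str.len sp.1 > PySem.Str.len primary then sp.1 else primary) b
    = pvMaxLen b (l.filter (fun y => y.2 == c)) := by
  intro l
  induction l with
  | nil => intro b; simp only [List.foldl_nil, List.filter_nil, pvMaxLen]
  | cons sp t ih =>
    intro b
    simp only [List.foldl_cons, List.filter_cons]
    by_cases h : sp.2 = c
    · by_cases h2 : PySem.Str.len sp.1 > PySem.Str.len b
      · rw [if_pos ⟨h, h2⟩, if_pos (show ((sp.2 == c) = true) by simpa using h), ih]
        simp only [pvMaxLen]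
        rw [if_pos h2]
      · rw [if_neg (by rintro ⟨_, hh⟩; exact h2 hh),
            if_pos (show ((sp.2 == c) = true) by simpa using h), ih]
        simp only [pvMaxLen]
        rw [if_neg h2]
    · rw [if_neg (by rintro ⟨hh, _⟩; exact h hh),
          if_neg (show ¬((sp.2 == c) = true) by simpa using h)]
      exact ih b

-- stability of PySem's insertion sort for key = Prod.snd:
-- filtering one key class commutes with inserting
theorem pvFilter_insertBy (c : Int) : ∀ (ys : List (String × Int)) (x : String × Int),
    ys.Pairwise (fun a b => a.2 ≤ b.2) →
    (PySem.List.insertBy (fun a b => decide (a.2 < b.2)) x ys).filter (fun y => y.2 == c)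
      = if x.2 == c then ys.filter (fun y => y.2 == c) ++ [x]
        else ys.filter (fun y => y.2 == c) := by
  intro ys
  induction ys with
  | nil => intro x _; by_cases hx : x.2 = c <;> simp [PySem.List.insertBy, hx]
  | cons y t ih =>
    intro x hp
    rw [List.pairwise_cons] at hp
    by_cases hlt : x.2 < y.2
    · have hyc : ∀ z ∈ y :: t, x.2 < z.2 := by
        intro z hz
        rcases List.mem_cons.mp hz with rfl | hz'
        · exact hlt
        · exact lt_of_lt_of_le hlt (hp.1 z hz')
      by_cases hx : x.2 = c
      · have hnil : (y :: t).filter (fun z => z.2 == c) = [] := by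
          rw [List.filter_eq_nil_iff]
          intro z hz
          have := hyc z hz
          simp only [beq_iff_eq]
          omega
        simp [PySem.List.insertBy, hx, hnil, show c < y.2 by omega]
      · simp [PySem.List.insertBy, hlt, hx]
    · have hih := ih x hp.2
      by_cases hy : y.2 = c <;> by_cases hx : x.2 = c
      · simp [PySem.List.insertBy, hy, hx, hih]
      · simp [PySem.List.insertBy, hy, hx, hih, show ¬(x.2 < c) by omega]
      · simp [PySem.List.insertBy, hy, hx, hih, show ¬(c < y.2) by omega]
      · simp [PySem.List.insertBy, hy, hx, hih, show ¬(x.2 < y.2) by omega]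

theorem pvPairwise_insertBy : ∀ (ys : List (String × Int)) (x : String × Int),
    ys.Pairwise (fun a b => a.2 ≤ b.2) →
    (PySem.List.insertBy (fun a b => decide (a.2 < b.2)) x ys).Pairwise (fun a b => a.2 ≤ b.2) := by
  intro ys
  induction ys with
  | nil => intro x _; simp [PySem.List.insertBy]
  | cons y t ih =>
    intro x hp
    rw [List.pairwise_cons] at hp
    by_cases hlt : x.2 < y.2
    · simp only [PySem.List.insertBy, hlt, decide_true, if_true]
      refine List.pairwise_cons.mpr ⟨?_, List.pairwise_cons.mpr hp⟩
      intro z hz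
      rcases List.mem_cons.mp hz with rfl | hz'
      · exact le_of_lt hlt
      · exact le_of_lt (lt_of_lt_of_le hlt (hp.1 z hz'))
    · simp only [PySem.List.insertBy, hlt, decide_false, Bool.false_eq_true, if_false]
      refine List.pairwise_cons.mpr ⟨?_, ih x hp.2⟩
      intro z hz
      rcases (PySem.List.mem_insertBy _ _ _ _).mp hz with rfl | hz'
      · exact not_lt.mp hlt
      · exact hp.1 z hz'

theorem pvSorted_filter (c : Int) : ∀ (l : List (String × Int)) (acc : List (String × Int)),
    acc.Pairwise (fun a b => a.2 ≤ b.2) →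
    (l.foldl (fun acc x => PySem.List.insertBy (fun a b => decide (a.2 < b.2)) x acc) acc).filter
        (fun y => y.2 == c)
      = acc.filter (fun y => y.2 == c) ++ l.filter (fun y => y.2 == c) := by
  intro l
  induction l with
  | nil => intro acc _; simp only [List.foldl_nil, List.filter_nil, List.append_nil]
  | cons x t ih =>
    intro acc hp
    simp only [List.foldl_cons]
    rw [ih _ (pvPairwise_insertBy acc x hp), pvFilter_insertBy c acc x hp]
    by_cases hx : x.2 = c <;> simp [hx]

-- the crux: B's one-pass best over a list whose keys are all ≥ c computes the first
-- longest candidate at position c (when one exists), paired with c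
theorem pvKey (c : Int) : ∀ (l : List (String × Int)) (b : String × Int),
    c ≤ b.2 → (∀ y ∈ l, c ≤ y.2) →
    ∀ hd tl, (b :: l).filter (fun y => y.2 == c) = hd :: tl →
    l.foldl pvStepB b = (pvMaxLen hd.1 tl, c) := by
  intro l
  induction l with
  | nil =>
    intro b hb _ hd tl hf
    by_cases hbc : b.2 = c
    · rw [List.filter_cons, if_pos (show ((b.2 == c) = true) by simpa using hbc),
          List.filter_nil] at hf
      injection hf with h1 h2
      subst h1; subst h2
      simp only [List.foldl_nil, pvMaxLen]
      rw [Prod.ext_iff]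
      exact ⟨rfl, hbc⟩
    · rw [List.filter_cons, if_neg (show ¬((b.2 == c) = true) by simpa using hbc),
          List.filter_nil] at hf
      exact absurd hf (by simp)
  | cons x t ih =>
    intro b hb hl hd tl hf
    have hx : c ≤ x.2 := hl x (by simp)
    have hl' : ∀ y ∈ t, c ≤ y.2 := fun y hy => hl y (List.mem_cons_of_mem x hy)
    rw [List.foldl_cons]
    by_cases hbc : b.2 = c
    · by_cases hxc : x.2 = c
      · -- both at position c: the step is the length comparison
        rw [List.filter_cons, if_pos (show ((b.2 == c) = true) by simpa using hbc),
            List.filter_cons, if_pos (show ((x.2 == c) = true) by simpa using hxc)] at hf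
        injection hf with h1 h2
        subst h1; subst h2
        have hfx : (x :: t).filter (fun y => y.2 == c) = x :: t.filter (fun y => y.2 == c) := by
          rw [List.filter_cons, if_pos (show ((x.2 == c) = true) by simpa using hxc)]
        by_cases hlen : PySem.Str.len x.1 > PySem.Str.len b.1
        · have hstep : pvStepB b x = x := by
            unfold pvStepB; rw [if_pos (Or.inr ⟨by omega, hlen⟩)]
          rw [hstep, ih x hx hl' x (t.filter (fun y => y.2 == c)) hfx]
          have hml : pvMaxLen b.1 (x :: t.filter (fun y => y.2 == c))
              = pvMaxLen x.1 (t.filter (fun y => y.2 == c)) := by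
            simp only [pvMaxLen]; rw [if_pos hlen]
          rw [hml]
        · have hstep : pvStepB b x = b := by
            unfold pvStepB
            rw [if_neg]
            rintro (h | ⟨_, h2⟩)
            · omega
            · exact hlen h2
          rw [hstep, ih b hb hl' b (t.filter (fun y => y.2 == c))
              (by rw [List.filter_cons, if_pos (show ((b.2 == c) = true) by simpa using hbc)])]
          have hml : pvMaxLen b.1 (x :: t.filter (fun y => y.2 == c))
              = pvMaxLen b.1 (t.filter (fun y => y.2 == c)) := by
            simp only [pvMaxLen]; rw [if_neg hlen]
          rw [hml]
      · -- b at c, x strictly later: x is skipped by both sides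
        have hstep : pvStepB b x = b := by
          unfold pvStepB
          rw [if_neg]
          rintro (h | ⟨h1, _⟩) <;> omega
        rw [List.filter_cons, if_pos (show ((b.2 == c) = true) by simpa using hbc),
            List.filter_cons, if_neg (show ¬((x.2 == c) = true) by simpa using hxc)] at hf
        rw [hstep]
        exact ih b hb hl' hd tl
          (by rw [List.filter_cons, if_pos (show ((b.2 == c) = true) by simpa using hbc)]; exact hf)
    · by_cases hxc : x.2 = c
      · -- x at c, b strictly later: x replaces b
        have hstep : pvStepB b x = x := by
          unfold pvStepB; rw [if_pos (Or.inl (by omega))]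
        rw [List.filter_cons, if_neg (show ¬((b.2 == c) = true) by simpa using hbc)] at hf
        rw [hstep]
        exact ih x hx hl' hd tl hf
      · -- neither at c: the survivor still has key ≠ c and ≥ c
        have h2 : ¬((pvStepB b x).2 = c) ∧ c ≤ (pvStepB b x).2 := by
          unfold pvStepB
          split_ifs with h
          · exact ⟨hxc, hx⟩
          · exact ⟨hbc, hb⟩
        rw [List.filter_cons, if_neg (show ¬((b.2 == c) = true) by simpa using hbc),
            List.filter_cons, if_neg (show ¬((x.2 == c) = true) by simpa using hxc)] at hf
        exact ih (pvStepB b x) h2.2 hl' hd tl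
          (by rw [List.filter_cons,
                  if_neg (show ¬(((pvStepB b x).2 == c) = true) by simpa using h2.1)]; exact hf)

-- ===== VERDICT (by name: the statement is the Claim_ definition above) =====
theorem determine_primary_service_py_spec : Claim_equal_determine_primary_service_py := by
  intro services msg _
  unfold Spec_determine_primary_service_py determine_primary_service_py determine_primary_service_py_alt
  cases services with
  | nil => rfl
  | cons s0 rest =>
    simp only [pvPs_eq msg, pvB_fold_eq msg, pvBestOf_eq, List.nil_append]
    cases hps : pvPsList msg (s0 :: rest) with
    | nil => rfl
    | cons f0 pt =>
      simp only [pvBestOf]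
      rw [if_neg (by simp)]
      cases hq : PySem.List.sorted (f0 :: pt) (fun x => x.2) with
      | nil => simp [PySem.List.sorted_eq_nil_iff] at hq
      | cons f qt =>
        rw [show (f :: qt).headD ("", 0) = f from rfl]
        rw [pvA_fold_eq f.2]
        have hmin : ∀ y ∈ f0 :: pt, f.2 ≤ y.2 :=
          PySem.List.key_head_sorted_le (xs := f0 :: pt) (key := fun x : String × Int => x.2) hq
        have hstab : ((f :: qt).filter (fun y => y.2 == f.2))
            = ((f0 :: pt).filter (fun y => y.2 == f.2)) := by
          rw [← hq, PySem.List.sorted_eq_foldl_insertBy]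
          simpa using pvSorted_filter f.2 (f0 :: pt) [] (by simp)
        have hffilt : ((f :: qt).filter (fun y => y.2 == f.2))
            = f :: qt.filter (fun y => y.2 == f.2) := by
          rw [List.filter_cons, if_pos (by simp)]
        have hkey := pvKey f.2 pt f0 (hmin f0 (by simp)) (fun y hy => hmin y (by simp [hy]))
          f (qt.filter (fun y => y.2 == f.2)) (by rw [← hstab]; exact hffilt)
        rw [hkey, hffilt]
        simp only [pvMaxLen, ite_self]
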